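-- pv_equiv track=rewrite | github.com/ibent95/pharmacy-gsp-flask | services/gsp.py | _do_product
-- ===== SOURCE A (Python) =====
-- def _do_product(items):
--     """
--     Combining the two tuples based on GSP alg - remove the first and last item
--     and then try to match the rest together
--     for example (a, b, c) and (b, c, e) create (a, b, c, e)
--     :param items:
--     :return:
--     """
--     new_candidates = []
--     if max([len(i) for i in items]) == 1:
--         for x in items:
--             for y in items:
--                 new_candidates.append((x[0], y[0]))
--     else:
--         # mapping_rest_to_first = {i[1:]: i[0] for i in items}
--         # mapping_rest_to_last = {i[:-1]: i[-1] for i in items}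
--
--         for head in items:
--             for tail in items:
--                 if head[1:] == tail[:-1]:
--                     new_candidates.append(tuple(head) + tuple(tail[-1]))
--
--     return list(set(new_candidates))
-- ===== SOURCE B (Python) =====
-- def _do_product(items):
--     """Same result as A: instead of the O(n^2) nested scan matching every head
--     against every tail, build a dict indexing items by their prefix item[:-1]
--     once, then look each head's suffix head[1:] up in it."""
--     if max(len(i) for i in items) == 1:
--         firsts = [i[0] for i in items]
--         new_candidates = [(x, y) for x in firsts for y in firsts]
--     else:
--         index = {}
--         for t in items:
--             index.setdefault(t[:-1], []).append(t[-1])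
--         new_candidates = []
--         for head in items:
--             for last in index.get(head[1:], ()):
--                 new_candidates.append(tuple(head) + tuple(last))
--     return list(set(new_candidates))
-- ===== Notes on version B (the rewrite author's own statement) =====
-- stated objective: faster
-- what changed: A matches every head against every tail in nested loops; B builds a dict from each item's prefix item[:-1] to its last elements once and looks each head's suffix head[1:] up in it, removing the inner scan.
import Mathlib
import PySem

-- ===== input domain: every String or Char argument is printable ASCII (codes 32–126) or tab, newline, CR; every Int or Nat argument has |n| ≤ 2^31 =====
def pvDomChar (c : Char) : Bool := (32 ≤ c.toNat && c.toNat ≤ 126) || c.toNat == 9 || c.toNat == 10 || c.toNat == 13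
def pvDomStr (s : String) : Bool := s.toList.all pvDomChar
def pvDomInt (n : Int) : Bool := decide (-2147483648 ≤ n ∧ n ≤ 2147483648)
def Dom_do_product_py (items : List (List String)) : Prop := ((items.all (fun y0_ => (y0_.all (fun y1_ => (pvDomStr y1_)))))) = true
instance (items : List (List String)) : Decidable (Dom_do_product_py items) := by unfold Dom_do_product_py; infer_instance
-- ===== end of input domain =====

-- B replaces A's O(n^2·L) nested head/tail scan by a dict indexing items by their prefix, looked up per head (same return value; A raises on empty inputs, excluded by Pre_).

-- ===== PORT A =====
-- tuple(s) of a Python string s: its characters as one-character strings (both Pythons' 'tuple(head) + tuple(last)')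
def pvChars (s : String) : List String := s.toList.map (fun c => String.ofList [c])

def do_product_py (items : List (List String)) : List (List String) :=
  -- max([len(i) for i in items]); Python raises ValueError on items = [], excluded by Pre_
  let m := ((items.map (fun i => i.length)).max?).getD 0
  let cands :=
    if m == 1 then
      items.foldl (fun acc x =>
        items.foldl (fun acc2 y =>
          acc2 ++ [[PySem.List.pyGetD x 0 "", PySem.List.pyGetD y 0 ""]]) acc) []
    else
      -- head[1:] = drop 1, tail[:-1] = dropLast (exact for these list slices)
      items.foldl (fun acc head =>
        items.foldl (fun acc2 tail =>
          if head.drop 1 == tail.dropLast then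
            acc2 ++ [head ++ pvChars (PySem.List.pyGetD tail (-1) "")]
          else acc2) acc) []
  PySem.Set.ofList cands

-- ===== PORT B =====
def do_product_py_alt (items : List (List String)) : List (List String) :=
  let m := ((items.map (fun i => i.length)).max?).getD 0
  let cands :=
    if m == 1 then
      let firsts := items.map (fun i => PySem.List.pyGetD i 0 "")
      firsts.flatMap (fun x => firsts.map (fun y => [x, y]))
    else
      -- index: prefix t[:-1] ↦ list of last elements t[-1], in items order
      let index := items.foldl (fun d t =>
        d.modify t.dropLast [] (fun l => l ++ [PySem.List.pyGetD t (-1) ""])) PySem.Dict.empty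
      items.foldl (fun acc head =>
        (index.getD (head.drop 1) []).foldl (fun acc2 last =>
          acc2 ++ [head ++ pvChars last]) acc) []
  PySem.Set.ofList cands

-- ===== PRECONDITION & SPEC =====
-- Pre_ excludes exactly the inputs where the Python A raises: empty items (max of []) and any empty inner tuple (x[0] / tail[-1] IndexError).
def Pre_do_product_py (items : List (List String)) : Prop :=
  items ≠ [] ∧ ∀ i ∈ items, i ≠ []
instance (items : List (List String)) : Decidable (Pre_do_product_py items) := by unfold Pre_do_product_py; infer_instance
def pvWitness_do_product_py : List (List String) := [["a", "b"], ["b", "c"]]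
def Spec_do_product_py (items : List (List String)) (out : List (List String)) : Prop := out = do_product_py_alt items
instance (items : List (List String)) (out : List (List String)) : Decidable (Spec_do_product_py items out) := by unfold Spec_do_product_py; infer_instance

-- ===== CLAIM (what is proved, stated in full; the proofs are below) =====
def Claim_equal_do_product_py : Prop := ∀ (items : List (List String)), Dom_do_product_py items → Pre_do_product_py items → Spec_do_product_py items (do_product_py items)

-- ===== LEMMAS AND PROOFS =====

-- the prefix index built by B's loop holds, per prefix p, the last elements of the items whose prefix is p, in items order
theorem pv_index_getD (items : List (List String)) (p : List String) :
    ((items.foldl (fun d t =>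
        d.modify t.dropLast [] (fun l => l ++ [PySem.List.pyGetD t (-1) ""])) PySem.Dict.empty).getD p [])
      = (items.filter (fun t => t.dropLast == p)).map (fun t => PySem.List.pyGetD t (-1) "") := by
  have h : (items.foldl (fun d t =>
        d.modify t.dropLast [] (fun l => l ++ [PySem.List.pyGetD t (-1) ""])) PySem.Dict.empty)
      = ((items.map (fun t => (t.dropLast, PySem.List.pyGetD t (-1) ""))).foldl
          (fun d q => d.modify q.1 [] (fun l => l ++ [q.2])) PySem.Dict.empty) := by
    rw [List.foldl_map]
  rw [h, PySem.Dict.getD_foldl_modify_append, PySem.Dict.getD_empty, List.filter_map,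
      List.map_map]
  simp [Function.comp_def]

theorem pv_cands_eq (items : List (List String)) :
    do_product_py items = do_product_py_alt items := by
  unfold do_product_py do_product_py_alt
  simp only [PySem.List.foldl_append_if, PySem.List.foldl_append_singleton_eq_map,
    PySem.List.foldl_append_eq_flatMap, List.nil_append, pv_index_getD]
  congr 1
  split
  · simp [List.flatMap_map, List.map_map, Function.comp_def]
  · congr 1
    funext head
    rw [List.map_map]
    apply congrArg
    apply List.filter_congr
    intro t _
    exact Bool.beq_comm ..

-- ===== VERDICT (by name: the statement is the Claim_ definition above) =====
theorem do_product_py_spec : Claim_equal_do_product_py := by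
  intro items _ _
  unfold Spec_do_product_py
  exact pv_cands_eq items
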